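-- pv_equiv track=rewrite | github.com/scorixear/EverybodyCodes | 2024/7/3.py | find_winning
-- ===== SOURCE A (Python) =====
-- class Chariot:
--     def __init__(self, actions: list[str]):
--         self.power: int = 10
--         self.total: int = 0
--         self.actions: list[str] = actions
--     def move(self, track: list[str]):
--         laps_total = 0
--         # every 11 laps, we reached get back to the starting condition
--         # since 2024/11 = 184, we can just multiply the total power by 184
--         for i in range(len(track)*11):
--             # get the action for the current lap
--             action = self.actions[i % len(self.actions)]
--             # get the action of the track
--             track_action = track[(i+1) % len(track)]
--             # if the track action does nothing
--             if track_action == "=" or track_action == "S":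
--                 # apply chariot action
--                 if action == "+":
--                     self.power += 1
--                 elif action == "-":
--                     self.power -= 1
--                     if self.power < 0:
--                         self.power = 0
--             # otherwise apply the track action
--             elif track_action == "+":
--                 self.power += 1
--             elif track_action == "-":
--                 self.power -= 1
--                 if self.power < 0:
--                     self.power = 0
--             laps_total += self.power
--         self.total = laps_total * 184
--
-- def find_winning(possible_moves: list[str], track: list[str], enemy_total: int, moves: list[str], seen: set[str]):
--     # if we already saw this combination of moves, ignore
--     if "".join(moves) in seen:
--         return 0
--     seen.add("".join(moves))
--     # if we have used all possible moves
--     if(len(possible_moves) == 0):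
--         # calculate the total score for the chariot
--         chariot = Chariot(moves)
--         chariot.move(track)
--         # if the chariot has a higher score than the enemy, return 1
--         if chariot.total > enemy_total:
--             return 1
--         return 0
--     counter = 0
--     # try all possible moves
--     for i, move in enumerate(possible_moves):
--         # remove the move from the list
--         new_possible_moves = possible_moves[:]
--         new_possible_moves.pop(i)
--         # and find all possible winning actions with the remaining moves
--         counter += find_winning(new_possible_moves, track, enemy_total, moves+[move], seen)
--     return counter
-- ===== SOURCE B (Python) =====
-- # B: explicit iterative DFS with a worklist stack instead of A's recursion; the Chariot
-- # class is replaced by a plain scoring function with the two branch chains merged.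
-- # Performs the same observable mutation of `seen` (same keys, same order) as A.
--
-- def _score(actions, track):
--     power, total = 10, 0
--     for i in range(len(track) * 11):
--         ta = track[(i + 1) % len(track)]
--         act = actions[i % len(actions)] if ta in ("=", "S") else ta
--         if act == "+":
--             power += 1
--         elif act == "-":
--             power = max(power - 1, 0)
--         total += power
--     return total * 184
--
-- def find_winning(possible_moves, track, enemy_total, moves, seen):
--     count = 0
--     stack = [(possible_moves, moves)]
--     while stack:
--         pm, mv = stack.pop()
--         key = "".join(mv)
--         if key in seen:
--             continue
--         seen.add(key)
--         if not pm:
--             if _score(mv, track) > enemy_total: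
--                 count += 1
--         else:
--             # push children in reverse so they are explored in A's order
--             for i in range(len(pm) - 1, -1, -1):
--                 stack.append((pm[:i] + pm[i + 1:], mv + [pm[i]]))
--     return count
-- ===== Notes on version B (the rewrite author's own statement) =====
-- stated objective: alternative
-- what changed: A's recursive permutation generator (with a Chariot class) is replaced by an explicit iterative DFS over a worklist stack of (remaining_moves, chosen_moves) states, with the chariot scoring inlined as a plain loop whose two branch chains are merged into one effective-action computation.
import Mathlib
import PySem

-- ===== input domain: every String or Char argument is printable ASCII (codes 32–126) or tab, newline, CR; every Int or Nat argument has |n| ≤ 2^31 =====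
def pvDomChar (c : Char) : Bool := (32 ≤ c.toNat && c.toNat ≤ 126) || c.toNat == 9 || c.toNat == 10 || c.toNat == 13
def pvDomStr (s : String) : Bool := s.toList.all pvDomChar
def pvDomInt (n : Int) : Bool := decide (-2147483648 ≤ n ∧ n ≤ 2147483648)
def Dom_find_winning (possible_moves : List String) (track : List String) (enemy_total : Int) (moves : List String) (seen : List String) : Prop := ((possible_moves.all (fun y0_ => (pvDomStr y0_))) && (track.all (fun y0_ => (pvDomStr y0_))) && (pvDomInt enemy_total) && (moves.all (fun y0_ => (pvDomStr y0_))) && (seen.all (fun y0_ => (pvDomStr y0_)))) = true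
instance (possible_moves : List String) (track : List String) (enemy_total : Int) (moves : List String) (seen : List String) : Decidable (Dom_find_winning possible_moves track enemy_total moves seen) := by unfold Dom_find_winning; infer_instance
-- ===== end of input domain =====

-- B rewrites A's recursive permutation generator as an explicit iterative DFS over a worklist
-- stack, with the Chariot class inlined as a plain scoring loop (objective: alternative).
-- Both Pythons mutate `seen` identically (same keys added, same order); equivalence here is
-- about the return value.

-- ===== PORT A =====

-- one iteration of the for-loop in Chariot.move; state is (power, laps_total).
-- indexing is exact: i ≥ 0 and the lists are nonempty whenever the loop runs on admitted inputs
def pvStepA (actions track : List String) (st : Int × Int) (i : Int) : Int × Int :=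
  let action := PySem.List.pyGetD actions (PySem.Int.mod i (PySem.List.len actions)) ""
  let track_action := PySem.List.pyGetD track (PySem.Int.mod (i + 1) (PySem.List.len track)) ""
  let p := st.1
  let p1 :=
    if track_action = "=" ∨ track_action = "S" then
      if action = "+" then p + 1
      else if action = "-" then (if p - 1 < 0 then 0 else p - 1)
      else p
    else if track_action = "+" then p + 1
    else if track_action = "-" then (if p - 1 < 0 then 0 else p - 1)
    else p
  (p1, st.2 + p1)

-- Chariot(actions); chariot.move(track); chariot.total
def pvChariotTotalA (actions track : List String) : Int :=
  ((PySem.List.pyRange 0 ((track.length : Int) * 11) 1).foldl (pvStepA actions track) (10, 0)).2 * 184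

-- A's recursion; the mutable set `seen` is threaded through and returned.
-- `new_possible_moves = possible_moves[:]; new_possible_moves.pop(i)` is pm.take i ++ pm.drop (i+1),
-- exact since 0 ≤ i < len pm for indices produced by enumerate.
def pvGoA (track : List String) (enemy_total : Int) (pm mv : List String) (seen : PySem.Set String) : Int × PySem.Set String :=
  if PySem.Set.contains seen (PySem.Str.join "" mv) then (0, seen)
  else
    let seen1 := PySem.Set.add seen (PySem.Str.join "" mv)
    if pm.length = 0 then
      ((if pvChariotTotalA mv track > enemy_total then 1 else 0), seen1)
    else
      (PySem.List.enumerate pm).attach.foldl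
        (fun st x =>
          let r := pvGoA track enemy_total (pm.take x.1.1.toNat ++ pm.drop (x.1.1.toNat + 1)) (mv ++ [x.1.2]) st.2
          (st.1 + r.1, r.2))
        (0, seen1)
termination_by pm.length
decreasing_by
  obtain ⟨k, hk, hx⟩ := (PySem.List.mem_enumerate_iff pm 0 x.1).mp x.2
  have h1 : x.1.1 = (k : Int) := by rw [hx]; simp
  rw [h1]
  simp only [List.length_append, List.length_take, List.length_drop, Int.toNat_natCast]
  omega

def find_winning (possible_moves : List String) (track : List String) (enemy_total : Int) (moves : List String) (seen : List String) : Int :=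
  (pvGoA track enemy_total possible_moves moves (PySem.Set.ofList seen)).1

-- ===== PORT B =====

-- one iteration of the loop in B's _score
def pvStepB (actions track : List String) (st : Int × Int) (i : Int) : Int × Int :=
  let ta := PySem.List.pyGetD track (PySem.Int.mod (i + 1) (PySem.List.len track)) ""
  let act := if ta = "=" ∨ ta = "S" then PySem.List.pyGetD actions (PySem.Int.mod i (PySem.List.len actions)) "" else ta
  let p := if act = "+" then st.1 + 1 else if act = "-" then max (st.1 - 1) 0 else st.1
  (p, st.2 + p)

def pvScoreB (actions track : List String) : Int :=
  ((PySem.List.pyRange 0 ((track.length : Int) * 11) 1).foldl (pvStepB actions track) (10, 0)).2 * 184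

-- termination measure for the worklist loop: weight of a state with n remaining moves
def pvW : Nat → Nat
  | 0 => 1
  | n + 1 => (n + 1) * pvW n + 1

def pvMeasure (stack : List (List String × List String)) : Nat :=
  (stack.map (fun s => pvW s.1.length)).sum

theorem pvW_pos (n : Nat) : 0 < pvW n := by
  cases n <;> simp [pvW]

-- 'for i in range(len(pm)-1,-1,-1): stack.append(child i)' on a stack modeled head-as-top
theorem pvPush_eq (l : List Int) (f : Int → (List String × List String)) (rest : List (List String × List String)) :
    l.foldl (fun st i => f i :: st) rest = l.reverse.map f ++ rest := by
  induction l generalizing rest with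
  | nil => rfl
  | cons a l ih => simp [List.foldl_cons, ih]

theorem pvChildLen (pm : List String) (i : Int) (h0 : 0 ≤ i) (h1 : i < (pm.length : Int)) :
    (pm.take i.toNat ++ pm.drop (i.toNat + 1)).length = pm.length - 1 := by
  have : i.toNat < pm.length := by omega
  simp [Nat.min_eq_left (Nat.le_of_lt this)]
  omega

theorem pvMeasure_push (pm mv : List String) (rest : List (List String × List String)) (h : pm.length ≠ 0) :
    pvMeasure ((PySem.List.pyRange ((pm.length : Int) - 1) (-1) (-1)).foldl
      (fun st i => (pm.take i.toNat ++ pm.drop (i.toNat + 1), mv ++ [PySem.List.pyGetD pm i ""]) :: st) rest)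
      < pvW pm.length + pvMeasure rest := by
  rw [pvPush_eq, PySem.List.pyRange_neg_one_eq_reverse]
  simp only [List.reverse_reverse]
  have hmap : ((PySem.List.pyRange (-1 + 1) ((pm.length : Int) - 1 + 1)).map
      (fun i => (pm.take i.toNat ++ pm.drop (i.toNat + 1), mv ++ [PySem.List.pyGetD pm i ""]))).map
        (fun s => pvW s.1.length)
      = (PySem.List.pyRange (-1 + 1) ((pm.length : Int) - 1 + 1)).map (fun _ => pvW (pm.length - 1)) := by
    rw [List.map_map]
    apply List.map_congr_left
    intro i hi
    rw [PySem.List.mem_pyRange_one] at hi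
    simp [Function.comp, pvChildLen pm i (by omega) (by omega)]
  unfold pvMeasure
  rw [List.map_append, List.sum_append, hmap, List.map_const', List.sum_replicate, smul_eq_mul]
  have hlen : (PySem.List.pyRange (-1 + 1) ((pm.length : Int) - 1 + 1)).length = pm.length := by
    rw [PySem.List.length_pyRange_one]; omega
  rw [hlen]
  have : pm.length * pvW (pm.length - 1) < pvW pm.length := by
    obtain ⟨m, hm⟩ : ∃ m, pm.length = m + 1 := ⟨pm.length - 1, by omega⟩
    rw [hm]
    simp only [pvW, Nat.add_sub_cancel]
    omega
  omega

-- B's worklist loop: stack of (remaining_moves pm, chosen_moves mv), head = top of the stack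
def pvGoB (track : List String) (enemy_total : Int) : List (List String × List String) → Int → PySem.Set String → Int
  | [], count, _ => count
  | (pm, mv) :: rest, count, seen =>
    if PySem.Set.contains seen (PySem.Str.join "" mv) then pvGoB track enemy_total rest count seen
    else
      let seen1 := PySem.Set.add seen (PySem.Str.join "" mv)
      if pm.length = 0 then
        pvGoB track enemy_total rest (count + if pvScoreB mv track > enemy_total then 1 else 0) seen1
      else
        pvGoB track enemy_total
          ((PySem.List.pyRange ((pm.length : Int) - 1) (-1) (-1)).foldl
            (fun st i => (pm.take i.toNat ++ pm.drop (i.toNat + 1), mv ++ [PySem.List.pyGetD pm i ""]) :: st) rest)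
          count seen1
termination_by stack => pvMeasure stack
decreasing_by
  · have := pvW_pos pm.length; simp [pvMeasure]; omega
  · have := pvW_pos pm.length; simp [pvMeasure]; omega
  · have := pvMeasure_push pm mv rest (by assumption)
    simp only [pvMeasure, List.map_cons, List.sum_cons] at *
    omega

def find_winning_alt (possible_moves : List String) (track : List String) (enemy_total : Int) (moves : List String) (seen : List String) : Int :=
  pvGoB track enemy_total [(possible_moves, moves)] 0 (PySem.Set.ofList seen)

-- ===== PRECONDITION & SPEC =====
-- Pre_ excludes exactly the inputs where A raises ZeroDivisionError: possible_moves and moves both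
-- empty with a nonempty track and "" not already seen — Chariot([]) then indexes actions[i % 0].
def Pre_find_winning (possible_moves : List String) (track : List String) (_enemy_total : Int) (moves : List String) (seen : List String) : Prop :=
  ¬ (possible_moves = [] ∧ moves = [] ∧ track ≠ [] ∧ "" ∉ seen)
instance (possible_moves : List String) (track : List String) (enemy_total : Int) (moves : List String) (seen : List String) : Decidable (Pre_find_winning possible_moves track enemy_total moves seen) := by unfold Pre_find_winning; infer_instance

def pvWitness_find_winning : List String × List String × Int × List String × List String :=
  (["+", "-"], ["S", "+"], 100, [], [])

def Spec_find_winning (possible_moves : List String) (track : List String) (enemy_total : Int) (moves : List String) (seen : List String) (out : Int) : Prop := out = find_winning_alt possible_moves track enemy_total moves seen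
instance (possible_moves : List String) (track : List String) (enemy_total : Int) (moves : List String) (seen : List String) (out : Int) : Decidable (Spec_find_winning possible_moves track enemy_total moves seen out) := by unfold Spec_find_winning; infer_instance

-- ===== CLAIM (what is proved, stated in full; the proofs are below) =====
def Claim_equal_find_winning : Prop := ∀ (possible_moves : List String) (track : List String) (enemy_total : Int) (moves : List String) (seen : List String), Dom_find_winning possible_moves track enemy_total moves seen → Pre_find_winning possible_moves track enemy_total moves seen → Spec_find_winning possible_moves track enemy_total moves seen (find_winning possible_moves track enemy_total moves seen)

-- ===== LEMMAS AND PROOFS =====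

-- the two scoring loops compute the same step function, hence the same total
theorem pvStep_eq (actions track : List String) : pvStepA actions track = pvStepB actions track := by
  funext st i
  simp only [pvStepA, pvStepB]
  split_ifs <;> simp_all <;> omega

theorem pvScore_eq (actions track : List String) : pvChariotTotalA actions track = pvScoreB actions track := by
  unfold pvChariotTotalA pvScoreB
  rw [pvStep_eq]

-- folding A's per-child step is additive in the accumulated counter
theorem pvFold_shift (g : PySem.Set String → Int → Int × PySem.Set String) :
    ∀ (l : List Int) (acc : Int) (seen : PySem.Set String),
    l.foldl (fun st i => (st.1 + (g st.2 i).1, (g st.2 i).2)) (acc, seen)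
    = (acc + (l.foldl (fun st i => (st.1 + (g st.2 i).1, (g st.2 i).2)) (0, seen)).1,
       (l.foldl (fun st i => (st.1 + (g st.2 i).1, (g st.2 i).2)) (0, seen)).2) := by
  intro l
  induction l with
  | nil => simp
  | cons a l ih =>
    intro acc seen
    simp only [List.foldl_cons]
    rw [ih, ih (0 + (g seen a).1)]
    simp [add_assoc]

-- main invariant: popping one state off B's stack accounts for A's whole recursive call on it
theorem pvMain (track : List String) (et : Int) :
    ∀ (n : Nat) (pm : List String), pm.length ≤ n → ∀ (mv : List String) (seen : PySem.Set String)
      (rest : List (List String × List String)) (count : Int),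
      pvGoB track et ((pm, mv) :: rest) count seen
        = pvGoB track et rest (count + (pvGoA track et pm mv seen).1) (pvGoA track et pm mv seen).2 := by
  intro n
  induction n with
  | zero =>
    intro pm hpm mv seen rest count
    have hpm0 : pm.length = 0 := Nat.le_zero.mp hpm
    rw [pvGoB.eq_def, pvGoA.eq_def]
    simp only []
    rw [pvScore_eq]
    split_ifs <;> simp
  | succ n ih =>
    intro pm hpm mv seen rest count
    rw [pvGoB.eq_def, pvGoA.eq_def]
    simp only []
    rw [pvScore_eq]
    split_ifs with h1 h2 h3
    · simp
    · simp
    · simp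
    · -- children case: A's fold over enumerate pm versus B's pushed child states
      rw [List.foldl_attach (l := PySem.List.enumerate pm)
            (f := fun (st : Int × PySem.Set String) (p : Int × String) =>
              (st.1 + (pvGoA track et (pm.take p.1.toNat ++ pm.drop (p.1.toNat + 1)) (mv ++ [p.2]) st.2).1,
               (pvGoA track et (pm.take p.1.toNat ++ pm.drop (p.1.toNat + 1)) (mv ++ [p.2]) st.2).2)),
          PySem.List.enumerate_eq_map_pyRange pm "", List.foldl_map]
      rw [pvPush_eq, PySem.List.pyRange_neg_one_eq_reverse]
      simp only [List.reverse_reverse, neg_add_cancel, sub_add_cancel, PySem.List.len_eq]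
      generalize PySem.Set.add seen (PySem.Str.join "" mv) = s0
      have hlen1 : ∀ i ∈ PySem.List.pyRange 0 ((pm.length : Int)), 0 ≤ i ∧ i < (pm.length : Int) :=
        fun i hi => PySem.List.mem_pyRange_one.mp hi
      revert hlen1
      generalize PySem.List.pyRange 0 ((pm.length : Int)) = L
      induction L generalizing count s0 rest with
      | nil => intro _; simp
      | cons a L ihL =>
        intro hlen1
        obtain ⟨ha0, ha1⟩ := hlen1 a (by simp)
        simp only [List.map_cons, List.cons_append, List.foldl_cons]
        rw [ih (pm.take a.toNat ++ pm.drop (a.toNat + 1))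
              (by rw [pvChildLen pm a ha0 ha1]; omega)]
        rw [ihL _ _ _ (fun i hi => hlen1 i (by simp [hi]))]
        conv_rhs => rw [pvFold_shift (fun s i =>
          pvGoA track et (pm.take i.toNat ++ pm.drop (i.toNat + 1)) (mv ++ [PySem.List.pyGetD pm i ""]) s)]
        simp [add_assoc]

-- ===== VERDICT (by name: the statement is the Claim_ definition above) =====
theorem find_winning_spec : Claim_equal_find_winning := by
  intro possible_moves track enemy_total moves seen _ _
  unfold Spec_find_winning find_winning find_winning_alt
  rw [pvMain track enemy_total possible_moves.length possible_moves le_rfl]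
  simp [pvGoB]
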